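-- pv_equiv track=rewrite | github.com/Dichgrem/Math-lab-fdzc | tarjan_algorithm.py | get_components_after_removal
-- ===== SOURCE A (Python) =====
-- def get_components_after_removal(graph, removed_vertex):
--     """Get the connected components after removing a vertex."""
--     n = len(graph)
--     visited = [False] * n
--     visited[removed_vertex] = True  # Treat removed vertex as already visited
--     components = []
--
--     def dfs(v, component):
--         visited[v] = True
--         component.append(v)
--         for neighbor in graph[v]:
--             if neighbor != removed_vertex and not visited[neighbor]:
--                 dfs(neighbor, component)
--
--     for i in range(n):
--         if not visited[i]:
--             component = []
--             dfs(i, component)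
--             if component:
--                 components.append(component)
--
--     return components
-- ===== SOURCE B (Python) =====
-- def get_components_after_removal(graph, removed_vertex):
--     """Get the connected components after removing a vertex (iterative DFS)."""
--     n = len(graph)
--     visited = [False] * n
--     visited[removed_vertex] = True  # Treat removed vertex as already visited
--     components = []
--     for i in range(n):
--         if visited[i]:
--             continue
--         component = []
--         stack = [i]
--         while stack:
--             v = stack.pop()
--             if visited[v]:
--                 continue
--             visited[v] = True
--             component.append(v)
--             for neighbor in reversed(graph[v]):
--                 if neighbor != removed_vertex and not visited[neighbor]:
--                     stack.append(neighbor)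
--         components.append(component)
--     return components
-- ===== Notes on version B (the rewrite author's own statement) =====
-- stated objective: alternative
-- what changed: Replaces the recursive DFS closure with an iterative DFS using an explicit stack (push reversed neighbors, dedupe at pop time), which reproduces the exact preorder and component order without Python recursion (A hits RecursionError on very deep graphs, B does not).
import Mathlib
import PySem

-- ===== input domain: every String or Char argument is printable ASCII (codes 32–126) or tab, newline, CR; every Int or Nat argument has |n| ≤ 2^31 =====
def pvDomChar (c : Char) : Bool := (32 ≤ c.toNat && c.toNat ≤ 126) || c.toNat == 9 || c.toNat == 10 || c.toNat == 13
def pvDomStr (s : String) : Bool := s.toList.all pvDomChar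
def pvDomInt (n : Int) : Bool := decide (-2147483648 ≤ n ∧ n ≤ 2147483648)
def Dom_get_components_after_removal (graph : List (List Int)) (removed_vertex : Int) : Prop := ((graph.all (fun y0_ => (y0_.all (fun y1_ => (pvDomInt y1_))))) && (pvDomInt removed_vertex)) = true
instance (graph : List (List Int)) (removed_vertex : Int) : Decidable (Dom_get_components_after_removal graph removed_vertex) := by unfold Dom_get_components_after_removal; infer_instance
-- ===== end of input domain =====

-- B replaces A's recursive DFS by an iterative DFS with an explicit stack (push reversed
-- neighbors, dedupe at pop time); same values, preorder and component order.
-- (A additionally raises RecursionError on graphs needing recursion depth near 1000; B does not.)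

-- Shared wrappers for the Python list primitives visited[x], visited[x]=True, graph[x]
-- (negative indices wrap as in Python; out of range reads as "visited" / sets nothing /
-- reads [], which Pre_ puts out of reach of the claim).
def pvVisAt (vis : List Bool) (x : Int) : Bool := PySem.List.pyGetD vis x true
def pvVisSet (vis : List Bool) (x : Int) : List Bool := PySem.List.pySetD vis x true
def pvNbrs (g : List (List Int)) (v : Int) : List Int := PySem.List.pyGetD g v []

-- lemmas cited by pvLoopB's decreasing_by (must precede the definition)
theorem pvVisAt_false_elim (vis : List Bool) (x : Int) (h : pvVisAt vis x = false) :
    ∃ j : Nat, PySem.List.pyIdx? vis.length x = some j ∧ vis[j]? = some false := by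
  unfold pvVisAt PySem.List.pyGetD PySem.List.pyGet? at h
  cases hj : PySem.List.pyIdx? vis.length x with
  | none => rw [hj] at h; simp at h
  | some j =>
    rw [hj] at h
    simp only [Option.bind_some] at h
    refine ⟨j, rfl, ?_⟩
    cases hv : vis[j]? with
    | none => rw [hv] at h; simp at h
    | some b => rw [hv] at h; simp at h; simp [h]

theorem count_false_set_true_lt (l : List Bool) (j : Nat) (hj : l[j]? = some false) :
    (l.set j true).count false < l.count false := by
  induction l generalizing j with
  | nil => simp at hj
  | cons b t ih =>
    cases j with
    | zero =>
      simp at hj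
      subst hj
      simp
    | succ k =>
      simp at hj
      have := ih k hj
      simp [List.count_cons]
      omega

theorem pvVisSet_count_lt (vis : List Bool) (v : Int) (h : pvVisAt vis v = false) :
    (pvVisSet vis v).count false < vis.count false := by
  obtain ⟨j, hj, hv⟩ := pvVisAt_false_elim vis v h
  unfold pvVisSet PySem.List.pySetD PySem.List.pySet?
  rw [hj]
  simpa using count_false_set_true_lt vis j hv

-- ===== PORT A =====
-- Python A's recursive dfs: dfs(v, component) marks v, appends v, then recurses over
-- graph[v]; `fuel` is a totality guard only (the top level passes graph.length + 1,
-- which the proofs show is never exhausted: recursion depth ≤ #unvisited vertices).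
mutual
def pvDfsA (g : List (List Int)) (rv : Int) : Nat → Int → List Bool → List Int → List Bool × List Int
  | 0, _, vis, comp => (vis, comp)
  | fuel + 1, v, vis, comp => pvDfsListA g rv fuel (pvNbrs g v) (pvVisSet vis v) (comp ++ [v])
  termination_by fuel _v _vis _comp => (fuel, 0)

def pvDfsListA (g : List (List Int)) (rv : Int) : Nat → List Int → List Bool → List Int → List Bool × List Int
  | _, [], vis, comp => (vis, comp)
  | fuel, nb :: rest, vis, comp =>
    if nb ≠ rv ∧ pvVisAt vis nb = false then
      let p := pvDfsA g rv fuel nb vis comp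
      pvDfsListA g rv fuel rest p.1 p.2
    else pvDfsListA g rv fuel rest vis comp
  termination_by fuel ns _vis _comp => (fuel, ns.length + 1)
end

def get_components_after_removal (graph : List (List Int)) (removed_vertex : Int) : List (List Int) :=
  let n := graph.length
  let visited := pvVisSet (List.replicate n false) removed_vertex
  ((PySem.List.pyRange 0 n 1).foldl
    (fun (st : List Bool × List (List Int)) i =>
      if pvVisAt st.1 i = false then
        let p := pvDfsA graph removed_vertex (n + 1) i st.1 []
        (p.1, if p.2 = [] then st.2 else st.2 ++ [p.2])
      else st)
    (visited, [])).2

-- ===== PORT B =====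
-- Source B's while loop: pop v, skip if visited, else mark, append, push reversed(graph[v])
-- neighbors that are neither removed nor visited.  Stack is a list with its top at the
-- head, so pushing while iterating reversed(graph[v]) is the foldl below.
def pvLoopB (g : List (List Int)) (rv : Int) : List Int → List Bool → List Int → List Bool × List Int
  | [], vis, comp => (vis, comp)
  | v :: rest, vis, comp =>
    if pvVisAt vis v = true then pvLoopB g rv rest vis comp
    else
      let vis' := pvVisSet vis v
      pvLoopB g rv
        ((pvNbrs g v).reverse.foldl
          (fun st nb => if nb ≠ rv ∧ pvVisAt vis' nb = false then nb :: st else st) rest)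
        vis' (comp ++ [v])
termination_by stack vis _ => (vis.count false, stack.length)
decreasing_by
  · exact Prod.Lex.right _ (Nat.lt_succ_self _)
  · exact Prod.Lex.left _ _ (pvVisSet_count_lt vis v (by simpa using ‹¬pvVisAt vis v = true›))

def get_components_after_removal_alt (graph : List (List Int)) (removed_vertex : Int) : List (List Int) :=
  let n := graph.length
  let visited := pvVisSet (List.replicate n false) removed_vertex
  ((PySem.List.pyRange 0 n 1).foldl
    (fun (st : List Bool × List (List Int)) i =>
      if pvVisAt st.1 i = true then st
      else
        let p := pvLoopB graph removed_vertex [i] st.1 []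
        (p.1, st.2 ++ [p.2]))
    (visited, [])).2

-- ===== PRECONDITION & SPEC =====
-- Pre_ = exactly the inputs where Python A returns (no IndexError): the graph is
-- non-empty, removed_vertex is a valid (possibly negative) index, and every neighbor in
-- every row other than the removed vertex's own row is either removed_vertex itself
-- (short-circuited before indexing) or a valid index.
def Pre_get_components_after_removal (graph : List (List Int)) (removed_vertex : Int) : Prop :=
  0 < graph.length ∧ PySem.Raise.InRange graph.length removed_vertex ∧
  ∀ p ∈ graph.zipIdx, PySem.List.pyIdx? graph.length removed_vertex ≠ some p.2 →
    ∀ x ∈ p.1, x = removed_vertex ∨ PySem.Raise.InRange graph.length x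

instance (graph : List (List Int)) (removed_vertex : Int) : Decidable (Pre_get_components_after_removal graph removed_vertex) := by
  unfold Pre_get_components_after_removal; infer_instance

def pvWitness_get_components_after_removal : List (List Int) × Int := ([[1], [0], []], 2)

def Spec_get_components_after_removal (graph : List (List Int)) (removed_vertex : Int) (out : List (List Int)) : Prop :=
  out = get_components_after_removal_alt graph removed_vertex

instance (graph : List (List Int)) (removed_vertex : Int) (out : List (List Int)) : Decidable (Spec_get_components_after_removal graph removed_vertex out) := by
  unfold Spec_get_components_after_removal; infer_instance

-- ===== CLAIM (what is proved, stated in full; the proofs are below) =====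
def Claim_equal_get_components_after_removal : Prop := ∀ (graph : List (List Int)) (removed_vertex : Int), Dom_get_components_after_removal graph removed_vertex → Pre_get_components_after_removal graph removed_vertex → Spec_get_components_after_removal graph removed_vertex (get_components_after_removal graph removed_vertex)

-- ===== LEMMAS AND PROOFS =====

theorem pvVisAt_false_intro (vis : List Bool) (x : Int) (j : Nat)
    (hj : PySem.List.pyIdx? vis.length x = some j) (hv : vis[j]? = some false) :
    pvVisAt vis x = false := by
  unfold pvVisAt PySem.List.pyGetD PySem.List.pyGet?
  rw [hj]
  simp [hv]

theorem length_pvVisSet (vis : List Bool) (y : Int) : (pvVisSet vis y).length = vis.length := by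
  unfold pvVisSet PySem.List.pySetD PySem.List.pySet?
  cases hk : PySem.List.pyIdx? vis.length y <;> simp

theorem getElem?_set_true_false {l : List Bool} {k j : Nat}
    (h : (l.set k true)[j]? = some false) : l[j]? = some false := by
  rw [List.getElem?_set] at h
  by_cases hkj : k = j
  · exfalso
    rw [if_pos hkj] at h
    split at h <;> simp_all
  · simpa [hkj] using h

theorem pvVisAt_set_false (vis : List Bool) (y x : Int)
    (h : pvVisAt (pvVisSet vis y) x = false) : pvVisAt vis x = false := by
  obtain ⟨j, hj, hv⟩ := pvVisAt_false_elim _ _ h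
  rw [length_pvVisSet] at hj
  refine pvVisAt_false_intro vis x j hj ?_
  unfold pvVisSet PySem.List.pySetD PySem.List.pySet? at hv
  cases hk : PySem.List.pyIdx? vis.length y with
  | none => rw [hk] at hv; simpa using hv
  | some k =>
    rw [hk] at hv
    simp only [Option.map_some, Option.getD_some] at hv
    exact getElem?_set_true_false hv

theorem pvVisAt_set_mono (vis : List Bool) (y x : Int)
    (h : pvVisAt vis x = true) : pvVisAt (pvVisSet vis y) x = true := by
  cases hx : pvVisAt (pvVisSet vis y) x with
  | false => rw [pvVisAt_set_false vis y x hx] at h; cases h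
  | true => rfl

theorem count_false_set_true_le (l : List Bool) (j : Nat) :
    (l.set j true).count false ≤ l.count false := by
  induction l generalizing j with
  | nil => simp
  | cons b t ih =>
    cases j with
    | zero => cases b <;> simp
    | succ k =>
      have := ih k
      simp only [List.set, List.count_cons]
      omega

theorem pvVisSet_count_le (vis : List Bool) (y : Int) :
    (pvVisSet vis y).count false ≤ vis.count false := by
  unfold pvVisSet PySem.List.pySetD PySem.List.pySet?
  cases hk : PySem.List.pyIdx? vis.length y with
  | none => simp
  | some k => simpa using count_false_set_true_le vis k

-- boolean test and normal form used by the stack-machine lemmas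
def pvCond (rv : Int) (vis : List Bool) (nb : Int) : Bool :=
  decide (nb ≠ rv ∧ pvVisAt vis nb = false)

def pvNf (vis : List Bool) (s : List Int) : List Int :=
  s.filter (fun x => !pvVisAt vis x)

theorem pvNf_append (vis : List Bool) (s t : List Int) :
    pvNf vis (s ++ t) = pvNf vis s ++ pvNf vis t := by
  simp [pvNf]

theorem pvNf_set (vis : List Bool) (y : Int) (r : List Int) :
    pvNf (pvVisSet vis y) r = (pvNf vis r).filter (fun x => !pvVisAt (pvVisSet vis y) x) := by
  unfold pvNf
  rw [List.filter_filter]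
  apply List.filter_congr
  intro x _
  cases hx : pvVisAt (pvVisSet vis y) x with
  | false => simp [pvVisAt_set_false vis y x hx]
  | true => simp

-- step lemmas for the ports (unfold one step of the WF recursions)
theorem pvLoopB_nil (g : List (List Int)) (rv : Int) (vis : List Bool) (comp : List Int) :
    pvLoopB g rv [] vis comp = (vis, comp) := by rw [pvLoopB]

theorem pvLoopB_skip (g : List (List Int)) (rv v : Int) (rest : List Int) (vis : List Bool)
    (comp : List Int) (hv : pvVisAt vis v = true) :
    pvLoopB g rv (v :: rest) vis comp = pvLoopB g rv rest vis comp := by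
  rw [pvLoopB, if_pos hv]

theorem foldl_push_eq_filter (rv : Int) (vis : List Bool) (ns rest : List Int) :
    ns.reverse.foldl
      (fun st nb => if nb ≠ rv ∧ pvVisAt vis nb = false then nb :: st else st) rest =
    ns.filter (pvCond rv vis) ++ rest := by
  induction ns with
  | nil => simp
  | cons nb t ih =>
    rw [List.reverse_cons, List.foldl_append, ih]
    simp only [List.foldl_cons, List.foldl_nil, List.filter_cons, pvCond]
    by_cases hc : nb ≠ rv ∧ pvVisAt vis nb = false
    · simp [hc]
    · simp [hc]

theorem pvLoopB_visit (g : List (List Int)) (rv v : Int) (rest : List Int) (vis : List Bool)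
    (comp : List Int) (hv : pvVisAt vis v = false) :
    pvLoopB g rv (v :: rest) vis comp =
      pvLoopB g rv ((pvNbrs g v).filter (pvCond rv (pvVisSet vis v)) ++ rest)
        (pvVisSet vis v) (comp ++ [v]) := by
  rw [pvLoopB, if_neg (by simp [hv])]
  simp only []
  rw [foldl_push_eq_filter]

theorem pvDfsA_zero (g : List (List Int)) (rv v : Int) (vis : List Bool) (comp : List Int) :
    pvDfsA g rv 0 v vis comp = (vis, comp) := by rw [pvDfsA]

theorem pvDfsA_succ (g : List (List Int)) (rv : Int) (f : Nat) (v : Int) (vis : List Bool)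
    (comp : List Int) :
    pvDfsA g rv (f + 1) v vis comp =
      pvDfsListA g rv f (pvNbrs g v) (pvVisSet vis v) (comp ++ [v]) := by rw [pvDfsA]

theorem pvDfsListA_nil (g : List (List Int)) (rv : Int) (f : Nat) (vis : List Bool)
    (comp : List Int) : pvDfsListA g rv f [] vis comp = (vis, comp) := by rw [pvDfsListA]

theorem pvDfsListA_cons_pos (g : List (List Int)) (rv : Int) (f : Nat) (nb : Int)
    (rest : List Int) (vis : List Bool) (comp : List Int)
    (hc : nb ≠ rv ∧ pvVisAt vis nb = false) :
    pvDfsListA g rv f (nb :: rest) vis comp =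
      pvDfsListA g rv f rest (pvDfsA g rv f nb vis comp).1 (pvDfsA g rv f nb vis comp).2 := by
  rw [pvDfsListA, if_pos hc]

theorem pvDfsListA_cons_neg (g : List (List Int)) (rv : Int) (f : Nat) (nb : Int)
    (rest : List Int) (vis : List Bool) (comp : List Int)
    (hc : ¬(nb ≠ rv ∧ pvVisAt vis nb = false)) :
    pvDfsListA g rv f (nb :: rest) vis comp = pvDfsListA g rv f rest vis comp := by
  rw [pvDfsListA, if_neg hc]

-- the invariant carried by A's dfs: length preserved, unvisited count nonincreasing,
-- visited marks monotone, component only extended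
def pvInv (vis : List Bool) (comp : List Int) (out : List Bool × List Int) : Prop :=
  out.1.length = vis.length ∧ out.1.count false ≤ vis.count false ∧
    (∀ x, pvVisAt vis x = true → pvVisAt out.1 x = true) ∧ ∃ t, out.2 = comp ++ t

theorem pvInv_refl (vis : List Bool) (comp : List Int) : pvInv vis comp (vis, comp) :=
  ⟨rfl, le_refl _, fun _ h => h, [], by simp⟩

theorem pvInv_trans {vis : List Bool} {comp : List Int} {vis' : List Bool} {comp' : List Int}
    {out : List Bool × List Int} (h1 : pvInv vis comp (vis', comp'))
    (h2 : pvInv vis' comp' out) : pvInv vis comp out := by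
  obtain ⟨a1, b1, c1, t1, d1⟩ := h1
  obtain ⟨a2, b2, c2, t2, d2⟩ := h2
  refine ⟨a2.trans a1, b2.trans b1, fun x hx => c2 x (c1 x hx), t1 ++ t2, ?_⟩
  simp only at d1 d2
  rw [d2, d1, List.append_assoc]

theorem pvInv_step (vis : List Bool) (comp : List Int) (y : Int) :
    pvInv vis comp (pvVisSet vis y, comp ++ [y]) :=
  ⟨length_pvVisSet vis y, pvVisSet_count_le vis y, fun x hx => pvVisAt_set_mono vis y x hx,
    [y], rfl⟩

theorem pvDfs_inv (g : List (List Int)) (rv : Int) : ∀ fuel : Nat,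
    (∀ (v : Int) (vis : List Bool) (comp : List Int),
        pvInv vis comp (pvDfsA g rv fuel v vis comp)) ∧
    (∀ (ns : List Int) (vis : List Bool) (comp : List Int),
        pvInv vis comp (pvDfsListA g rv fuel ns vis comp)) := by
  intro fuel
  induction fuel with
  | zero =>
    constructor
    · intro v vis comp; rw [pvDfsA_zero]; exact pvInv_refl vis comp
    · intro ns
      induction ns with
      | nil => intro vis comp; rw [pvDfsListA_nil]; exact pvInv_refl vis comp
      | cons nb rest ih =>
        intro vis comp
        by_cases hc : nb ≠ rv ∧ pvVisAt vis nb = false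
        · rw [pvDfsListA_cons_pos g rv 0 nb rest vis comp hc, pvDfsA_zero]
          exact ih vis comp
        · rw [pvDfsListA_cons_neg g rv 0 nb rest vis comp hc]
          exact ih vis comp
  | succ f ihf =>
    have hd : ∀ (v : Int) (vis : List Bool) (comp : List Int),
        pvInv vis comp (pvDfsA g rv (f + 1) v vis comp) := by
      intro v vis comp
      rw [pvDfsA_succ]
      exact pvInv_trans (pvInv_step vis comp v) (ihf.2 _ _ _)
    refine ⟨hd, ?_⟩
    intro ns
    induction ns with
    | nil => intro vis comp; rw [pvDfsListA_nil]; exact pvInv_refl vis comp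
    | cons nb rest ih =>
      intro vis comp
      by_cases hc : nb ≠ rv ∧ pvVisAt vis nb = false
      · rw [pvDfsListA_cons_pos g rv (f + 1) nb rest vis comp hc]
        exact pvInv_trans (hd nb vis comp) (ih _ _)
      · rw [pvDfsListA_cons_neg g rv (f + 1) nb rest vis comp hc]
        exact ih vis comp

-- the stack machine ignores everything but the unvisited entries of its stack
theorem pvLoop_congr (g : List (List Int)) (rv : Int) (vis : List Bool) (comp : List Int)
    (s₁ s₂ : List Int) (h : pvNf vis s₁ = pvNf vis s₂) :
    pvLoopB g rv s₁ vis comp = pvLoopB g rv s₂ vis comp := by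
  cases s₁ with
  | nil =>
    cases s₂ with
    | nil => rfl
    | cons y r₂ =>
      by_cases hy : pvVisAt vis y = true
      · rw [pvLoopB_skip g rv y r₂ vis comp hy]
        exact pvLoop_congr g rv vis comp [] r₂ (by unfold pvNf at h ⊢; simpa [hy] using h)
      · exfalso
        have hyf : pvVisAt vis y = false := by simpa using hy
        unfold pvNf at h
        simp [hyf] at h
  | cons x r₁ =>
    by_cases hx : pvVisAt vis x = true
    · rw [pvLoopB_skip g rv x r₁ vis comp hx]
      exact pvLoop_congr g rv vis comp r₁ s₂ (by unfold pvNf at h ⊢; simpa [hx] using h)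
    · have hxf : pvVisAt vis x = false := by simpa using hx
      cases s₂ with
      | nil =>
        exfalso
        unfold pvNf at h
        simp [hxf] at h
      | cons y r₂ =>
        by_cases hy : pvVisAt vis y = true
        · rw [pvLoopB_skip g rv y r₂ vis comp hy]
          exact pvLoop_congr g rv vis comp (x :: r₁) r₂
            (by unfold pvNf at h ⊢; simpa [hy] using h)
        · have hyf : pvVisAt vis y = false := by simpa using hy
          have hxy : x = y ∧ pvNf vis r₁ = pvNf vis r₂ := by
            unfold pvNf at h
            simp only [List.filter_cons, hxf, hyf, Bool.not_false, if_pos] at h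
            exact ⟨List.head_eq_of_cons_eq h, List.tail_eq_of_cons_eq h⟩
          obtain ⟨rfl, hr⟩ := hxy
          rw [pvLoopB_visit g rv x r₁ vis comp hxf, pvLoopB_visit g rv x r₂ vis comp hxf]
          exact pvLoop_congr g rv (pvVisSet vis x) (comp ++ [x]) _ _
            (by rw [pvNf_append, pvNf_append, pvNf_set vis x r₁, pvNf_set vis x r₂, hr])
termination_by (vis.count false, s₁.length + s₂.length)
decreasing_by
  · apply Prod.Lex.right
    subst_vars
    simp only [List.length_cons]
    omega
  · apply Prod.Lex.right
    subst_vars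
    simp only [List.length_cons]
    omega
  · apply Prod.Lex.right
    subst_vars
    simp only [List.length_cons]
    omega
  · exact Prod.Lex.left _ _ (pvVisSet_count_lt vis x hxf)

-- the simulation: running the stack machine on the filtered pushes equals A's dfs loop
theorem pvSim (g : List (List Int)) (rv : Int) : ∀ (fuel : Nat) (ns : List Int)
    (vis : List Bool) (comp : List Int) (rest : List Int), vis.count false ≤ fuel →
    pvLoopB g rv (ns.filter (pvCond rv vis) ++ rest) vis comp =
      pvLoopB g rv rest (pvDfsListA g rv fuel ns vis comp).1
        (pvDfsListA g rv fuel ns vis comp).2 := by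
  intro fuel
  induction fuel with
  | zero =>
    intro ns vis comp rest hf
    have hall : ∀ x : Int, pvVisAt vis x = true := by
      intro x
      cases hx : pvVisAt vis x with
      | true => rfl
      | false =>
        exfalso
        obtain ⟨j, _, hv⟩ := pvVisAt_false_elim vis x hx
        have hmem : false ∈ vis := List.mem_of_getElem? hv
        have : 0 < vis.count false := List.count_pos_iff.mpr hmem
        omega
    have hdfs : pvDfsListA g rv 0 ns vis comp = (vis, comp) := by
      induction ns with
      | nil => exact pvDfsListA_nil g rv 0 vis comp
      | cons nb rest' ih =>
        rw [pvDfsListA_cons_neg g rv 0 nb rest' vis comp (by simp [hall nb])]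
        exact ih
    have hfilter : ns.filter (pvCond rv vis) = [] := by
      apply List.filter_eq_nil_iff.mpr
      intro x _
      simp [pvCond, hall x]
    rw [hfilter, hdfs]
    simp
  | succ f ihf =>
    intro ns
    induction ns with
    | nil =>
      intro vis comp rest _
      rw [pvDfsListA_nil]
      simp
    | cons nb ns' ih =>
      intro vis comp rest hf
      by_cases hc : nb ≠ rv ∧ pvVisAt vis nb = false
      · have hcb : pvCond rv vis nb = true := by simp [pvCond, hc.1, hc.2]
        rw [List.filter_cons_of_pos hcb, List.cons_append,
          pvLoopB_visit g rv nb (ns'.filter (pvCond rv vis) ++ rest) vis comp hc.2,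
          ihf (pvNbrs g nb) (pvVisSet vis nb) (comp ++ [nb]) _
            (by
              have h1 := pvVisSet_count_lt vis nb hc.2
              omega),
          ← pvDfsA_succ]
        set q := pvDfsA g rv (f + 1) nb vis comp with hq
        have hmono := ((pvDfs_inv g rv (f + 1)).1 nb vis comp).2.2.1
        have hcg : pvNf q.1 (ns'.filter (pvCond rv vis) ++ rest) =
            pvNf q.1 (ns'.filter (pvCond rv q.1) ++ rest) := by
          rw [pvNf_append, pvNf_append]
          congr 1
          unfold pvNf
          rw [List.filter_filter, List.filter_filter]
          apply List.filter_congr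
          intro x _
          cases hqx : pvVisAt q.1 x with
          | true => simp [hqx]
          | false =>
            have hvx : pvVisAt vis x = false := by
              cases hvx : pvVisAt vis x with
              | false => rfl
              | true => rw [hmono x hvx] at hqx; cases hqx
            simp [hqx, pvCond, hvx]
        rw [pvLoop_congr g rv q.1 q.2 _ _ hcg,
          pvDfsListA_cons_pos g rv (f + 1) nb ns' vis comp hc]
        apply ih
        have hq1 : q.1.count false ≤ (pvVisSet vis nb).count false := by
          rw [hq, pvDfsA_succ]
          exact ((pvDfs_inv g rv f).2 (pvNbrs g nb) (pvVisSet vis nb) (comp ++ [nb])).2.1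
        have h1 := pvVisSet_count_lt vis nb hc.2
        omega
      · have hcb : pvCond rv vis nb = false := by
          simp only [pvCond, decide_eq_false_iff_not]
          exact hc
        rw [List.filter_cons_of_neg (by simp [hcb]),
          pvDfsListA_cons_neg g rv (f + 1) nb ns' vis comp hc]
        exact ih vis comp rest hf

-- the outer loops over range(n) agree step by step
theorem pvOuter (g : List (List Int)) (rv : Int) : ∀ (l : List Int) (vis : List Bool)
    (comps : List (List Int)), vis.length = g.length →
    l.foldl
      (fun (st : List Bool × List (List Int)) i =>
        if pvVisAt st.1 i = false then
          let p := pvDfsA g rv (g.length + 1) i st.1 []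
          (p.1, if p.2 = [] then st.2 else st.2 ++ [p.2])
        else st) (vis, comps) =
    l.foldl
      (fun (st : List Bool × List (List Int)) i =>
        if pvVisAt st.1 i = true then st
        else
          let p := pvLoopB g rv [i] st.1 []
          (p.1, st.2 ++ [p.2])) (vis, comps) := by
  intro l
  induction l with
  | nil => intro vis comps _; rfl
  | cons i t ih =>
    intro vis comps hlen
    simp only [List.foldl_cons]
    by_cases hi : pvVisAt vis i = true
    · rw [if_neg (by simp [hi]), if_pos hi]
      exact ih vis comps hlen
    · have hif : pvVisAt vis i = false := by simpa using hi
      rw [if_pos hif, if_neg hi]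
      set p := pvDfsA g rv (g.length + 1) i vis [] with hp
      have hcount : (pvVisSet vis i).count false ≤ g.length := by
        have h1 := pvVisSet_count_le vis i
        have h2 := List.count_le_length (l := vis) (a := false)
        omega
      have hq : pvLoopB g rv [i] vis [] = (p.1, p.2) := by
        rw [pvLoopB_visit g rv i [] vis [] hif,
          pvSim g rv g.length (pvNbrs g i) (pvVisSet vis i) ([] ++ [i]) [] hcount,
          pvLoopB_nil, hp, pvDfsA_succ]
      rw [hq]
      obtain ⟨tl, htl⟩ :=
        ((pvDfs_inv g rv g.length).2 (pvNbrs g i) (pvVisSet vis i) ([] ++ [i])).2.2.2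
      have hne : p.2 ≠ [] := by
        rw [hp, pvDfsA_succ, htl]
        simp
      rw [if_neg hne]
      apply ih
      have hl1 : p.1.length = (pvVisSet vis i).length := by
        rw [hp, pvDfsA_succ]
        exact ((pvDfs_inv g rv g.length).2 (pvNbrs g i) (pvVisSet vis i) ([] ++ [i])).1
      rw [hl1, length_pvVisSet, hlen]

theorem get_components_after_removal_spec : Claim_equal_get_components_after_removal := by
  intro graph removed_vertex _ _
  unfold Spec_get_components_after_removal get_components_after_removal
    get_components_after_removal_alt
  simp only []
  rw [pvOuter graph removed_vertex (PySem.List.pyRange 0 graph.length 1)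
    (pvVisSet (List.replicate graph.length false) removed_vertex) []
    (by rw [length_pvVisSet, List.length_replicate])]
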